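-- pv_equiv track=rewrite | github.com/gratisreise/problem-solve | 프로그래머스/1/133499. 옹알이 （2）/옹알이 （2）.py | solution
-- ===== SOURCE A (Python) =====
-- def solution(babbling):
--     # 조카가 발음할 수 있는 단어 목록
--     valid_sounds = ["aya", "ye", "woo", "ma"]
--
--     # 발음할 수 있는 단어 개수를 저장할 변수
--     count = 0
--
--     for word in babbling:
--         # 중복되는 발음이 있는지 확인
--         if any(double in word for double in ["ayaaya", "yeye", "woowoo", "mama"]):
--             continue
--
--         # 발음할 수 있는 단어가 아니라면, 남은 문자열이 있으면 발음할 수 없음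
--         temp = word
--         for sound in valid_sounds:
--             temp = temp.replace(sound, " ")
--
--         # 남은 문자열이 빈 문자열이라면 발음 가능
--         if temp.strip() == "":
--             count += 1
--
--     return count
-- ===== SOURCE B (Python) =====
-- def solution(babbling):
--     sounds = ("aya", "ye", "woo", "ma")
--     doubles = ("ayaaya", "yeye", "woowoo", "mama")
--     count = 0
--     for word in babbling:
--         if any(d in word for d in doubles):
--             continue
--         i, n, ok = 0, len(word), True
--         while i < n:
--             if word[i].isspace():
--                 i += 1
--                 continue
--             for s in sounds:
--                 if word.startswith(s, i):
--                     i += len(s)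
--                     break
--             else:
--                 ok = False
--                 break
--         if ok:
--             count += 1
--     return count
-- ===== Notes on version B (the rewrite author's own statement) =====
-- stated objective: alternative
-- what changed: A validates a word by chaining word.replace(sound, ' ') over the four sounds and testing that the stripped remainder is empty; B instead runs a single greedy left-to-right consuming parser over the word (skip whitespace, else consume the unique sound starting at the current position), keeping the same doubled-sound guard.
import Mathlib
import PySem

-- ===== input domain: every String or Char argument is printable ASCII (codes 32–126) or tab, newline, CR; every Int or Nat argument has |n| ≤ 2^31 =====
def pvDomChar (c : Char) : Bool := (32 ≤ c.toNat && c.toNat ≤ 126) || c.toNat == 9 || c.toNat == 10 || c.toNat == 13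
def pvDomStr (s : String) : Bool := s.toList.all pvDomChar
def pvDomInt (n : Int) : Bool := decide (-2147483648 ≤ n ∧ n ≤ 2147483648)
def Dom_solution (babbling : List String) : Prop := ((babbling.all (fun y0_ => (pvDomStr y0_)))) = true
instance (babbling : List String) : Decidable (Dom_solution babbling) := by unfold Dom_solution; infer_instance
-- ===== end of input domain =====

-- B replaces A's chain of str.replace substitutions + strip by a single greedy left-to-right
-- consuming parser per word (objective: alternative algorithm, similar cost).

-- ===== PORT A =====
-- literal port of A: reject words containing a doubled sound, then replace each sound by " "
-- and accept iff the stripped remainder is empty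
def solution (babbling : List String) : Int :=
  babbling.foldl (fun count word =>
    if (["ayaaya", "yeye", "woowoo", "mama"]).any (fun dbl => PySem.Str.isIn dbl word) then
      count
    else
      let temp := (["aya", "ye", "woo", "ma"]).foldl (fun t s => PySem.Str.replace t s " ") word
      if PySem.Str.strip temp = "" then count + 1 else count) 0

-- ===== PORT B =====
-- greedy parser of Source B's while loop: skip whitespace, else consume whichever sound starts here
-- (the loop index i becomes the consumed prefix of the char list)
def pvParse : List Char → Bool
  | [] => true
  | c :: t =>
    if PySem.Chars.isspace c then pvParse t
    else if ['a','y','a'].isPrefixOf (c :: t) then pvParse (t.drop 2)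
    else if ['y','e'].isPrefixOf (c :: t) then pvParse (t.drop 1)
    else if ['w','o','o'].isPrefixOf (c :: t) then pvParse (t.drop 2)
    else if ['m','a'].isPrefixOf (c :: t) then pvParse (t.drop 1)
    else false
termination_by w => w.length
decreasing_by all_goals (simp; try omega)

def solution_alt (babbling : List String) : Int :=
  babbling.foldl (fun count word =>
    if (["ayaaya", "yeye", "woowoo", "mama"]).any (fun dbl => PySem.Str.isIn dbl word) then
      count
    else if pvParse word.toList then count + 1 else count) 0

-- ===== PRECONDITION & SPEC =====
def Spec_solution (babbling : List String) (out : Int) : Prop := out = solution_alt babbling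
instance (babbling : List String) (out : Int) : Decidable (Spec_solution babbling out) := by unfold Spec_solution; infer_instance

-- ===== CLAIM (what is proved, stated in full; the proofs are below) =====
def Claim_equal_solution : Prop := ∀ (babbling : List String), Dom_solution babbling → Spec_solution babbling (solution babbling)

-- ===== LEMMAS AND PROOFS =====

-- structural specification of Python's str.replace (leftmost, non-overlapping, all occurrences)
def pvRep (old new : List Char) : List Char → List Char
  | [] => []
  | c :: t =>
    if old.isPrefixOf (c :: t) then new ++ pvRep old new (t.drop (old.length - 1))
    else c :: pvRep old new t
termination_by s => s.length
decreasing_by all_goals (simp; try omega)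

theorem pvRep_nil (old new : List Char) : pvRep old new [] = [] := by simp [pvRep]

theorem pvRep_pos (old new : List Char) (c : Char) (t : List Char)
    (h : old.isPrefixOf (c :: t) = true) :
    pvRep old new (c :: t) = new ++ pvRep old new (t.drop (old.length - 1)) := by
  rw [pvRep]; simp [h]

theorem pvRep_neg (old new : List Char) (c : Char) (t : List Char)
    (h : ¬ old.isPrefixOf (c :: t) = true) :
    pvRep old new (c :: t) = c :: pvRep old new t := by
  rw [pvRep]; simp [h]

theorem pvRep_ne (p : Char) (ps new : List Char) (c : Char) (t : List Char) (h : p ≠ c) :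
    pvRep (p :: ps) new (c :: t) = c :: pvRep (p :: ps) new t := by
  apply pvRep_neg
  simp [List.isPrefixOf]
  intro hc
  exact absurd hc h

theorem pvGo_eq (old new : List Char) (hold : old ≠ []) :
    ∀ (fuel : Nat) (l acc : List Char), l.length ≤ fuel →
      PySem.Chars.replace.go old new fuel l acc = acc.reverse ++ pvRep old new l := by
  intro fuel
  induction fuel with
  | zero =>
    intro l acc h
    have hl : l = [] := by cases l <;> simp_all
    subst hl
    simp [PySem.Chars.replace.go, pvRep_nil]
  | succ n ih =>
    intro l acc h
    cases l with
    | nil => simp [PySem.Chars.replace.go, pvRep_nil]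
    | cons c t =>
      rw [PySem.Chars.replace.go]
      by_cases hp : old.isPrefixOf (c :: t) = true
      · obtain ⟨o, os, rfl⟩ : ∃ o os, old = o :: os := by
          cases old with
          | nil => exact absurd rfl hold
          | cons o os => exact ⟨o, os, rfl⟩
        simp only [hp, if_pos]
        rw [ih (List.drop (o :: os).length (c :: t)) (new.reverse ++ acc)
            (by simp at h ⊢; omega)]
        rw [pvRep_pos _ _ _ _ hp]
        simp
      · simp only [hp, if_neg, Bool.false_eq_true, not_false_iff]
        rw [ih t (c :: acc) (by simp at h; omega)]
        rw [pvRep_neg _ _ _ _ hp]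
        simp

theorem pvReplace_eq (s old new : List Char) (hold : old ≠ []) :
    PySem.Chars.replace s old new = pvRep old new s := by
  have hne : old.isEmpty = false := by cases old <;> simp_all
  simp [PySem.Chars.replace, hne]
  rw [pvGo_eq old new hold s.length s [] (Nat.le_refl _)]
  simp

-- head of a replacement output with new = [' ']: either ' ' or the original head
theorem pvRep_head? (old t : List Char) (x : Char) (hx : x ≠ ' ')
    (h : (pvRep old [' '] t).head? = some x) : t.head? = some x := by
  cases t with
  | nil => simp [pvRep_nil] at h
  | cons c u =>
    by_cases hp : old.isPrefixOf (c :: u) = true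
    · rw [pvRep_pos _ _ _ _ hp] at h
      simp at h
      exact absurd h.symm hx
    · rw [pvRep_neg _ _ _ _ hp] at h
      simp at h
      simp [h]

theorem pvStrip_nil_iff (x : List Char) :
    PySem.Chars.strip x = [] ↔ x.all PySem.Chars.isspace = true := by
  constructor
  · intro h
    simp [PySem.Chars.strip, PySem.Chars.rstrip, PySem.Chars.lstrip] at h
    rw [List.all_eq_true]
    intro a ha
    have hx : a ∈ List.takeWhile PySem.Chars.isspace x ++ List.dropWhile PySem.Chars.isspace x := by
      rw [List.takeWhile_append_dropWhile]; exact ha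
    rcases List.mem_append.1 hx with h3 | h3
    · exact List.mem_takeWhile_imp h3
    · exact h a h3
  · intro h
    rw [List.all_eq_true] at h
    have h1 : List.dropWhile PySem.Chars.isspace x = [] :=
      List.dropWhile_eq_nil_iff.2 (fun a ha => h a ha)
    simp [PySem.Chars.strip, PySem.Chars.lstrip, PySem.Chars.rstrip, h1]

def pvChain (s : List Char) : List Char :=
  pvRep ['m','a'] [' '] (pvRep ['w','o','o'] [' '] (pvRep ['y','e'] [' '] (pvRep ['a','y','a'] [' '] s)))

theorem pvPreTwo (p q c : Char) (X : List Char) (h : [p, q].isPrefixOf (c :: X) = true) :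
    c = p ∧ X.head? = some q := by
  cases X with
  | nil => simp [List.isPrefixOf] at h
  | cons a Y => simp [List.isPrefixOf] at h; exact ⟨h.1.symm, by simp [h.2]⟩

theorem pvPreOO (X : List Char) (h : ['o', 'o'].isPrefixOf X = true) :
    X.head? = some 'o' ∧ X.tail.head? = some 'o' := by
  cases X with
  | nil => simp [List.isPrefixOf] at h
  | cons a Y =>
    cases Y with
    | nil => simp [List.isPrefixOf] at h
    | cons b Z => simp [List.isPrefixOf] at h; simp [← h.1, ← h.2]

theorem pvMain : ∀ (n : Nat) (s : List Char), s.length ≤ n →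
    ((pvChain s).all PySem.Chars.isspace) = pvParse s := by
  intro n
  induction n with
  | zero =>
    intro s hs
    have hnil : s = [] := by cases s <;> simp_all
    subst hnil
    simp [pvChain, pvRep_nil, pvParse]
  | succ n ih =>
    intro s hs
    cases s with
    | nil => simp [pvChain, pvRep_nil, pvParse]
    | cons c t =>
      cases hws : PySem.Chars.isspace c with
      | true =>
        have ha : ('a' : Char) ≠ c := by intro h; rw [← h] at hws; exact absurd hws (by decide)
        have hy : ('y' : Char) ≠ c := by intro h; rw [← h] at hws; exact absurd hws (by decide)
        have hw : ('w' : Char) ≠ c := by intro h; rw [← h] at hws; exact absurd hws (by decide)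
        have hm : ('m' : Char) ≠ c := by intro h; rw [← h] at hws; exact absurd hws (by decide)
        have hch : pvChain (c :: t) = c :: pvChain t := by
          simp only [pvChain]
          rw [pvRep_ne 'a' _ _ c t ha, pvRep_ne 'y' _ _ c _ hy,
              pvRep_ne 'w' _ _ c _ hw, pvRep_ne 'm' _ _ c _ hm]
        rw [hch, pvParse]
        simp only [List.all_cons, hws, Bool.true_and, if_pos]
        exact ih t (by simp at hs; omega)
      | false =>
        by_cases h1 : ['a','y','a'].isPrefixOf (c :: t) = true
        · -- the word starts with "aya"
          cases t with
          | nil => simp [List.isPrefixOf] at h1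
          | cons d t2 =>
            cases t2 with
            | nil => simp [List.isPrefixOf] at h1
            | cons e u =>
              simp [List.isPrefixOf] at h1
              obtain ⟨rfl, rfl, rfl⟩ : 'a' = c ∧ 'y' = d ∧ 'a' = e := ⟨h1.1, h1.2.1, h1.2.2⟩
              have hch : pvChain ('a'::'y'::'a'::u) = ' ' :: pvChain u := by
                simp only [pvChain]
                rw [pvRep_pos ['a','y','a'] [' '] 'a' ('y'::'a'::u) (by simp [List.isPrefixOf])]
                simp only [List.length_cons, List.length_nil, List.drop_succ_cons,
                  List.drop_zero, List.cons_append, List.nil_append]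
                rw [pvRep_ne 'y' _ _ ' ' _ (by decide), pvRep_ne 'w' _ _ ' ' _ (by decide),
                    pvRep_ne 'm' _ _ ' ' _ (by decide)]
              have hp : pvParse ('a'::'y'::'a'::u) = pvParse u := by
                rw [pvParse]
                simp [show PySem.Chars.isspace 'a' = false from by decide, List.isPrefixOf]
              rw [hch, hp]
              simp only [List.all_cons, show PySem.Chars.isspace ' ' = true from by decide,
                Bool.true_and]
              exact ih u (by simp at hs; omega)
        · by_cases h2 : ['y','e'].isPrefixOf (c :: t) = true
          · -- the word starts with "ye"
            cases t with
            | nil => simp [List.isPrefixOf] at h2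
            | cons e u =>
              simp [List.isPrefixOf] at h2
              obtain ⟨rfl, rfl⟩ : 'y' = c ∧ 'e' = e := ⟨h2.1, h2.2⟩
              have hch : pvChain ('y'::'e'::u) = ' ' :: pvChain u := by
                simp only [pvChain]
                rw [pvRep_ne 'a' _ _ 'y' _ (by decide), pvRep_ne 'a' _ _ 'e' _ (by decide)]
                rw [pvRep_pos ['y','e'] [' '] 'y' ('e' :: pvRep ['a','y','a'] [' '] u)
                  (by simp [List.isPrefixOf])]
                simp only [List.length_cons, List.length_nil, List.drop_succ_cons,
                  List.drop_zero, List.cons_append, List.nil_append]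
                rw [pvRep_ne 'w' _ _ ' ' _ (by decide), pvRep_ne 'm' _ _ ' ' _ (by decide)]
              have hp : pvParse ('y'::'e'::u) = pvParse u := by
                rw [pvParse]
                simp [show PySem.Chars.isspace 'y' = false from by decide, List.isPrefixOf]
              rw [hch, hp]
              simp only [List.all_cons, show PySem.Chars.isspace ' ' = true from by decide,
                Bool.true_and]
              exact ih u (by simp at hs; omega)
          · by_cases h3 : ['w','o','o'].isPrefixOf (c :: t) = true
            · -- the word starts with "woo"
              cases t with
              | nil => simp [List.isPrefixOf] at h3
              | cons d t2 =>
                cases t2 with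
                | nil => simp [List.isPrefixOf] at h3
                | cons e u =>
                  simp [List.isPrefixOf] at h3
                  obtain ⟨rfl, rfl, rfl⟩ : 'w' = c ∧ 'o' = d ∧ 'o' = e := ⟨h3.1, h3.2.1, h3.2.2⟩
                  have hch : pvChain ('w'::'o'::'o'::u) = ' ' :: pvChain u := by
                    simp only [pvChain]
                    rw [pvRep_ne 'a' _ _ 'w' _ (by decide), pvRep_ne 'a' _ _ 'o' _ (by decide),
                        pvRep_ne 'a' _ _ 'o' _ (by decide)]
                    rw [pvRep_ne 'y' _ _ 'w' _ (by decide), pvRep_ne 'y' _ _ 'o' _ (by decide),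
                        pvRep_ne 'y' _ _ 'o' _ (by decide)]
                    rw [pvRep_pos ['w','o','o'] [' '] 'w'
                      ('o' :: 'o' :: pvRep ['y','e'] [' '] (pvRep ['a','y','a'] [' '] u))
                      (by simp [List.isPrefixOf])]
                    simp only [List.length_cons, List.length_nil, List.drop_succ_cons,
                      List.drop_zero, List.cons_append, List.nil_append]
                    rw [pvRep_ne 'm' _ _ ' ' _ (by decide)]
                  have hp : pvParse ('w'::'o'::'o'::u) = pvParse u := by
                    rw [pvParse]
                    simp [show PySem.Chars.isspace 'w' = false from by decide, List.isPrefixOf]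
                  rw [hch, hp]
                  simp only [List.all_cons, show PySem.Chars.isspace ' ' = true from by decide,
                    Bool.true_and]
                  exact ih u (by simp at hs; omega)
            · by_cases h4 : ['m','a'].isPrefixOf (c :: t) = true
              · -- the word starts with "ma"
                cases t with
                | nil => simp [List.isPrefixOf] at h4
                | cons d u =>
                  simp [List.isPrefixOf] at h4
                  obtain ⟨rfl, rfl⟩ : 'm' = c ∧ 'a' = d := ⟨h4.1, h4.2⟩
                  by_cases hya : ['y','a'].isPrefixOf u = true
                  · -- "ma" followed by "ya…": an "aya" straddles the boundary; both sides reject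
                    cases u with
                    | nil => simp [List.isPrefixOf] at hya
                    | cons d2 u2 =>
                      cases u2 with
                      | nil => simp [List.isPrefixOf] at hya
                      | cons e2 v =>
                        simp [List.isPrefixOf] at hya
                        obtain ⟨rfl, rfl⟩ : 'y' = d2 ∧ 'a' = e2 := ⟨hya.1, hya.2⟩
                        have hall : (pvChain ('m'::'a'::'y'::'a'::v)).all PySem.Chars.isspace
                            = false := by
                          simp only [pvChain]
                          rw [pvRep_ne 'a' _ _ 'm' _ (by decide)]
                          rw [pvRep_pos ['a','y','a'] [' '] 'a' ('y'::'a'::v)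
                            (by simp [List.isPrefixOf])]
                          simp only [List.length_cons, List.length_nil, List.drop_succ_cons,
                            List.drop_zero, List.cons_append, List.nil_append]
                          rw [pvRep_ne 'y' _ _ 'm' _ (by decide), pvRep_ne 'y' _ _ ' ' _ (by decide)]
                          rw [pvRep_ne 'w' _ _ 'm' _ (by decide), pvRep_ne 'w' _ _ ' ' _ (by decide)]
                          rw [pvRep_neg ['m','a'] [' '] 'm' _ (by simp [List.isPrefixOf])]
                          rw [pvRep_ne 'm' _ _ ' ' _ (by decide)]
                          simp [List.all_cons, show PySem.Chars.isspace 'm' = false from by decide]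
                        have hp : pvParse ('m'::'a'::'y'::'a'::v) = false := by
                          rw [pvParse]
                          simp only [show PySem.Chars.isspace 'm' = false from by decide,
                            Bool.false_eq_true, if_false]
                          rw [if_neg (by simp [List.isPrefixOf]), if_neg (by simp [List.isPrefixOf]),
                              if_neg (by simp [List.isPrefixOf]), if_pos (by simp [List.isPrefixOf])]
                          simp only [List.drop_succ_cons, List.drop_zero]
                          rw [pvParse]
                          simp [show PySem.Chars.isspace 'y' = false from by decide,
                            List.isPrefixOf]
                        rw [hall, hp]
                  · -- a genuine "ma" sound at the front
                    have hch : pvChain ('m'::'a'::u) = ' ' :: pvChain u := by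
                      simp only [pvChain]
                      rw [pvRep_ne 'a' _ _ 'm' _ (by decide)]
                      rw [pvRep_neg ['a','y','a'] [' '] 'a' u (by simpa [List.isPrefixOf] using hya)]
                      rw [pvRep_ne 'y' _ _ 'm' _ (by decide), pvRep_ne 'y' _ _ 'a' _ (by decide)]
                      rw [pvRep_ne 'w' _ _ 'm' _ (by decide), pvRep_ne 'w' _ _ 'a' _ (by decide)]
                      rw [pvRep_pos ['m','a'] [' '] 'm'
                        ('a' :: pvRep ['w','o','o'] [' '] (pvRep ['y','e'] [' ']
                          (pvRep ['a','y','a'] [' '] u))) (by simp [List.isPrefixOf])]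
                      simp only [List.length_cons, List.length_nil, List.drop_succ_cons,
                        List.drop_zero, List.cons_append, List.nil_append]
                    have hp : pvParse ('m'::'a'::u) = pvParse u := by
                      rw [pvParse]
                      simp [show PySem.Chars.isspace 'm' = false from by decide, List.isPrefixOf]
                    rw [hch, hp]
                    simp only [List.all_cons, show PySem.Chars.isspace ' ' = true from by decide,
                      Bool.true_and]
                    exact ih u (by simp at hs; omega)
              · -- no sound matches and c is not whitespace: both sides are false
                have hall : (pvChain (c :: t)).all PySem.Chars.isspace = false := by
                  by_cases hca : c = 'a'
                  · subst hca
                    simp only [pvChain]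
                    rw [pvRep_neg _ _ _ _ h1, pvRep_ne 'y' _ _ 'a' _ (by decide),
                        pvRep_ne 'w' _ _ 'a' _ (by decide), pvRep_ne 'm' _ _ 'a' _ (by decide)]
                    simp [List.all_cons, hws]
                  · by_cases hcy : c = 'y'
                    · subst hcy
                      have hr2 : ¬ ['y','e'].isPrefixOf ('y' :: pvRep ['a','y','a'] [' '] t) = true := by
                        intro hp
                        have ht := pvRep_head? _ _ _ (by decide) (pvPreTwo _ _ _ _ hp).2
                        cases t with
                        | nil => simp at ht
                        | cons e u =>
                          simp at ht
                          subst ht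
                          exact h2 (by simp [List.isPrefixOf])
                      simp only [pvChain]
                      rw [pvRep_ne 'a' _ _ 'y' _ (by decide), pvRep_neg _ _ _ _ hr2,
                          pvRep_ne 'w' _ _ 'y' _ (by decide), pvRep_ne 'm' _ _ 'y' _ (by decide)]
                      simp [List.all_cons, hws]
                    · by_cases hcw : c = 'w'
                      · subst hcw
                        have hr3 : ¬ ['w','o','o'].isPrefixOf
                            ('w' :: pvRep ['y','e'] [' '] (pvRep ['a','y','a'] [' '] t)) = true := by
                          intro hp
                          have hoo : ['o','o'].isPrefixOf
                              (pvRep ['y','e'] [' '] (pvRep ['a','y','a'] [' '] t)) = true := by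
                            simpa [List.isPrefixOf] using hp
                          have ht := pvRep_head? _ _ _ (by decide)
                            (pvRep_head? _ _ _ (by decide) (pvPreOO _ hoo).1)
                          cases t with
                          | nil => simp at ht
                          | cons o u =>
                            simp at ht
                            subst ht
                            rw [pvRep_ne 'a' _ _ 'o' _ (by decide),
                                pvRep_ne 'y' _ _ 'o' _ (by decide)] at hoo
                            have htl := (pvPreOO _ hoo).2
                            simp only [List.tail_cons] at htl
                            have hu := pvRep_head? _ _ _ (by decide)
                              (pvRep_head? _ _ _ (by decide) htl)
                            cases u with
                            | nil => simp at hu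
                            | cons o2 v =>
                              simp at hu
                              subst hu
                              exact h3 (by simp [List.isPrefixOf])
                        simp only [pvChain]
                        rw [pvRep_ne 'a' _ _ 'w' _ (by decide), pvRep_ne 'y' _ _ 'w' _ (by decide),
                            pvRep_neg _ _ _ _ hr3, pvRep_ne 'm' _ _ 'w' _ (by decide)]
                        simp [List.all_cons, hws]
                      · by_cases hcm : c = 'm'
                        · subst hcm
                          have hr4 : ¬ ['m','a'].isPrefixOf
                              ('m' :: pvRep ['w','o','o'] [' '] (pvRep ['y','e'] [' ']
                                (pvRep ['a','y','a'] [' '] t))) = true := by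
                            intro hp
                            have ht := pvRep_head? _ _ _ (by decide) (pvRep_head? _ _ _ (by decide)
                              (pvRep_head? _ _ _ (by decide) (pvPreTwo _ _ _ _ hp).2))
                            cases t with
                            | nil => simp at ht
                            | cons a2 u =>
                              simp at ht
                              subst ht
                              exact h4 (by simp [List.isPrefixOf])
                          simp only [pvChain]
                          rw [pvRep_ne 'a' _ _ 'm' _ (by decide), pvRep_ne 'y' _ _ 'm' _ (by decide),
                              pvRep_ne 'w' _ _ 'm' _ (by decide), pvRep_neg _ _ _ _ hr4]
                          simp [List.all_cons, hws]
                        · simp only [pvChain]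
                          rw [pvRep_ne 'a' _ _ c _ (fun h => hca h.symm),
                              pvRep_ne 'y' _ _ c _ (fun h => hcy h.symm),
                              pvRep_ne 'w' _ _ c _ (fun h => hcw h.symm),
                              pvRep_ne 'm' _ _ c _ (fun h => hcm h.symm)]
                          simp [List.all_cons, hws]
                rw [hall, pvParse]
                simp [hws, h1, h2, h3, h4]

theorem pvWord (w : String) :
    (PySem.Str.strip ((["aya", "ye", "woo", "ma"] : List String).foldl
        (fun t s => PySem.Str.replace t s " ") w) = "")
      ↔ pvParse w.toList = true := by
  have h1 : (["aya", "ye", "woo", "ma"] : List String).foldl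
      (fun t s => PySem.Str.replace t s " ") w
      = PySem.Str.replace (PySem.Str.replace (PySem.Str.replace
          (PySem.Str.replace w "aya" " ") "ye" " ") "woo" " ") "ma" " " := by
    simp [List.foldl]
  rw [h1, show ∀ s : String, (s = "") ↔ s.toList = [] from fun s => by
    rw [String.toList_eq_nil_iff]]
  rw [PySem.Str.toList_strip]
  simp only [PySem.Str.toList_replace]
  rw [show ("aya" : String).toList = ['a','y','a'] from rfl,
      show ("ye" : String).toList = ['y','e'] from rfl,
      show ("woo" : String).toList = ['w','o','o'] from rfl,
      show ("ma" : String).toList = ['m','a'] from rfl,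
      show (" " : String).toList = [' '] from rfl]
  rw [pvReplace_eq _ _ _ (by decide), pvReplace_eq _ _ _ (by decide),
      pvReplace_eq _ _ _ (by decide), pvReplace_eq _ _ _ (by decide)]
  rw [pvStrip_nil_iff]
  rw [show pvRep ['m','a'] [' '] (pvRep ['w','o','o'] [' '] (pvRep ['y','e'] [' ']
      (pvRep ['a','y','a'] [' '] w.toList))) = pvChain w.toList from rfl]
  rw [pvMain w.toList.length w.toList (Nat.le_refl _)]

theorem pvFun_eq :
    (fun (count : Int) (word : String) =>
      if (["ayaaya", "yeye", "woowoo", "mama"]).any (fun dbl => PySem.Str.isIn dbl word) then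
        count
      else
        let temp := (["aya", "ye", "woo", "ma"]).foldl (fun t s => PySem.Str.replace t s " ") word
        if PySem.Str.strip temp = "" then count + 1 else count)
    = (fun (count : Int) (word : String) =>
      if (["ayaaya", "yeye", "woowoo", "mama"]).any (fun dbl => PySem.Str.isIn dbl word) then
        count
      else if pvParse word.toList then count + 1 else count) := by
  funext count word
  by_cases hg : ((["ayaaya", "yeye", "woowoo", "mama"]).any
      (fun dbl => PySem.Str.isIn dbl word)) = true
  · simp only [hg, if_true]
  · simp only [hg, Bool.false_eq_true, if_false]
    by_cases hc : pvParse word.toList = true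
    · rw [if_pos hc, if_pos ((pvWord word).2 hc)]
    · rw [if_neg hc, if_neg (fun h => hc ((pvWord word).1 h))]

-- ===== VERDICT (by name: the statement is the Claim_ definition above) =====
theorem solution_spec : Claim_equal_solution := by
  unfold Claim_equal_solution
  intro babbling _
  unfold Spec_solution solution solution_alt
  rw [pvFun_eq]
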